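-- pv_equiv track=rewrite | github.com/jjuraska/slug2slug | e2e_nlg/slot_alignment.py | permuteSentCombos
-- ===== SOURCE A (Python) =====
-- from collections import OrderedDict
-- import itertools
--
-- def mergeOrderedDicts(mrs, order=None):
--     if order is None:
--         order = ["da", "name", "eatType", "food", "priceRange", "customer_rating", "area", "familyFriendly", "near",
--                  "type", "family", "hasusbport", "hdmiport", "ecorating", "screensizerange", "screensize", "pricerange", "price", "audio", "resolution", "powerconsumption", "color", "accessories", "count",
--                  "processor", "memory", "driverange", "drive", "batteryrating", "battery", "weightrange", "weight", "dimension", "design", "utility", "platform", "isforbusinesscomputing", "warranty"]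
--     merged_mr = OrderedDict()
--     for slot in order:
--         for mr in mrs:
--             if slot in mr:
--                 merged_mr[slot] = mr[slot]
--                 break
--     return merged_mr
--
-- def permuteSentCombos(newPairs, mrs, utterances, max_iter=False, depth=1, assume_root=False):
--     """
--     :param newPairs: dict of {utterance:mr}
--     :param mrs: mrs list - assume it's passed in
--     :param utterances: utterance list - assume it's passed in
--     :param depth: the depth of the combinations. 1 for example means a root sentence + one follow on.
--         For example:
--         utterance: a. b. c. d.
--         depth 1, root a:
--         a. b., a. c., a. d.
--         depth 2, root a:
--         a. b. c., a. d. c., ...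
--     :param assume_root: if we assume the first sentence in the list of sentences is the root most sentence, this is true,
--         if this is true then we will only consider combinations with the the first sentence being the root.
--         Note - a sentence is a "root" if it has the actual name of the restraunt in it. In many cases, there is only
--         one root anyways.
--     :return:
--     """
--     if len(newPairs) <= 1:
--         return
--     roots = []
--     children = []
--     for sent, new_slots in newPairs.items():
--         if "name" in new_slots and new_slots["name"] in sent:
--             roots.append((sent, new_slots))
--         else:
--             children.append((sent, new_slots))
--     for root in roots:
--         tmp = children + roots
--         tmp.remove(root)
--
--         combs = []
--         for i in range(1, len(tmp) + 1):
--             els = [list(x) for x in itertools.combinations(tmp, i)]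
--             combs.extend(els)
--
--         if max_iter:
--             depth = len(tmp)
--
--         for comb in combs:
--             if 0 < len(comb) <= depth:
--                 new_mr, new_utterance = mergeEntries([root] + comb)
--                 if "position" in new_mr:
--                     del new_mr["position"]
--                 new_utterance = new_utterance.strip()
--                 if new_utterance not in utterances:
--                     mrs.append(new_mr)
--                     utterances.append(new_utterance)
--
--         if assume_root:
--             break
--     # frivolous return for potential debug
--     return utterances, mrs
--
-- def mergeEntries(merge_tuples):
--     """
--     :param merge_tuples: list of (utterance, mr) tuples to merge into one pair
--     :return:
--     """
--     sent = ""
--     mr = OrderedDict()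
--     mrs = []
--     for curr_sent, curr_mr in merge_tuples:
--         sent += " " + curr_sent
--         mrs.append(curr_mr)
--     mr = mergeOrderedDicts(mrs)
--     return mr, sent
-- ===== SOURCE B (Python) =====
-- from collections import OrderedDict
--
-- _SLOT_ORDER = ["da", "name", "eatType", "food", "priceRange", "customer_rating", "area", "familyFriendly", "near",
--                "type", "family", "hasusbport", "hdmiport", "ecorating", "screensizerange", "screensize", "pricerange", "price", "audio", "resolution", "powerconsumption", "color", "accessories", "count",
--                "processor", "memory", "driverange", "drive", "batteryrating", "battery", "weightrange", "weight", "dimension", "design", "utility", "platform", "isforbusinesscomputing", "warranty"]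
--
-- def permuteSentCombos(newPairs, mrs, utterances, max_iter=False, depth=1, assume_root=False):
--     # BFS frontier: combinations are grown level by level up to the depth bound
--     # (A generates all 2^n subsets and filters by length); the merged MR is built
--     # with one first-wins dict pass instead of a scan per slot; a set tracks known
--     # utterances. Appends to the caller's mrs/utterances like A does.
--     items = list(newPairs.items())
--     if len(items) <= 1:
--         return
--     is_root = lambda sent, slots: "name" in slots and slots["name"] in sent
--     roots = [p for p in items if is_root(*p)]
--     children = [p for p in items if not is_root(*p)]
--     seen = set(utterances)
--     for root in (roots[:1] if assume_root else roots):
--         pool = children + roots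
--         pool.remove(root)
--         limit = len(pool) if max_iter else min(depth, len(pool))
--         frontier = [([], pool)]
--         for _ in range(limit):
--             nxt = []
--             for combo, rest in frontier:
--                 for j in range(len(rest)):
--                     nxt.append((combo + [rest[j]], rest[j + 1:]))
--             for combo, _ in nxt:
--                 parts = [root] + combo
--                 combined = {}
--                 for _, cur_mr in parts:
--                     for k, v in cur_mr.items():
--                         combined.setdefault(k, v)
--                 new_mr = OrderedDict((s, combined[s]) for s in _SLOT_ORDER if s in combined)
--                 new_utt = " ".join(s for s, _ in parts).strip()
--                 if new_utt not in seen: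
--                     mrs.append(new_mr)
--                     utterances.append(new_utt)
--                     seen.add(new_utt)
--             frontier = nxt
--     return utterances, mrs
-- ===== Notes on version B (the rewrite author's own statement) =====
-- stated objective: alternative
-- what changed: B grows combinations with a BFS frontier level by level only up to the depth bound (A materialises all 2^n subsets and filters by length), partitions roots/children with two filters instead of an accumulating loop, iterates a sliced roots list instead of breaking, merges MRs with a single first-wins dict pass instead of a scan per slot, and keeps a set of known utterances for the membership test.
import Mathlib
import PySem

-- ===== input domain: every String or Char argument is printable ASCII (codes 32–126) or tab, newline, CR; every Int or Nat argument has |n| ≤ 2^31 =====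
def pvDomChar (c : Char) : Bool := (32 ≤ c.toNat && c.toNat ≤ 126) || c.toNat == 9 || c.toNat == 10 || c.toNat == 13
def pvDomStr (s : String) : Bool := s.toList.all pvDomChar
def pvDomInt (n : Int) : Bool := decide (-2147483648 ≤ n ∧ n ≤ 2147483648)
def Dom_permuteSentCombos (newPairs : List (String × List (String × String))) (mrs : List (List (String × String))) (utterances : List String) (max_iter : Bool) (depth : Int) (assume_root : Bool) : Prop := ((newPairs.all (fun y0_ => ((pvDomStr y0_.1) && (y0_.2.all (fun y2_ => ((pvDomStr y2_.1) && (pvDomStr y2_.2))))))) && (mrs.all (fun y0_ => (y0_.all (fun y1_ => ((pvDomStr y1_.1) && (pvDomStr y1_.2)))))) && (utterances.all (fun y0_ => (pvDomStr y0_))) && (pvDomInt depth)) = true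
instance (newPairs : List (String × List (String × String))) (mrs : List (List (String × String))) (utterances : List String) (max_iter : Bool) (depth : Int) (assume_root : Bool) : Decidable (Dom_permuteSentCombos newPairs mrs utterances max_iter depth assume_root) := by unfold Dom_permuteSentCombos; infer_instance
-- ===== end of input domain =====

-- B grows combinations with a BFS frontier level by level only up to the depth bound (A
-- materialises all 2^n subsets and filters by length), partitions roots/children with two
-- filters, iterates a sliced roots list instead of breaking, merges the MRs with one
-- first-wins dict pass, and tracks known utterances in a set. Both programs also append to
-- the caller's `mrs`/`utterances` lists in place (A and B mutate identically); the
-- equivalence proved here is about the return value.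

abbrev PvSDict := PySem.Dict String String

-- the fixed slot order of mergeOrderedDicts (same literal in both programs)
def pvSlotOrder : List String := ["da", "name", "eatType", "food", "priceRange", "customer_rating", "area", "familyFriendly", "near",
  "type", "family", "hasusbport", "hdmiport", "ecorating", "screensizerange", "screensize", "pricerange", "price", "audio", "resolution", "powerconsumption", "color", "accessories", "count",
  "processor", "memory", "driverange", "drive", "batteryrating", "battery", "weightrange", "weight", "dimension", "design", "utility", "platform", "isforbusinesscomputing", "warranty"]

-- ===== PORT A =====

-- inner loop of mergeOrderedDicts: 'for mr in mrs: if slot in mr: merged[slot] = mr[slot]; break'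
def pvMergeSlot (slot : String) (ds : List PvSDict) (merged : PvSDict) : PvSDict :=
  match ds with
  | [] => merged
  | mr :: t => if mr.contains slot then merged.insert slot (mr.getD slot "") else pvMergeSlot slot t merged

def pvMergeOrderedDicts (ds : List PvSDict) : PvSDict :=
  pvSlotOrder.foldl (fun merged slot => pvMergeSlot slot ds merged) PySem.Dict.empty

-- mergeEntries: sent accumulated as 'sent += " " + curr_sent', mrs accumulated, then merged
def pvMergeEntries (tuples : List (String × PvSDict)) : PvSDict × List Char :=
  let st := tuples.foldl (fun (acc : List Char × List PvSDict) p => (acc.1 ++ (' ' :: p.1.toList), acc.2 ++ [p.2])) (([] : List Char), ([] : List PvSDict))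
  (pvMergeOrderedDicts st.2, st.1)

-- 'for root in roots: ... if assume_root: break'; state = (utterances, mrs).
-- Python rebinds 'depth = len(tmp)' under max_iter; len(tmp) is the same at every
-- iteration, so recomputing it per root is exact.
def pvRootsLoopA (pending : List (String × PvSDict)) (children roots : List (String × PvSDict)) (st : List String × List PvSDict) (max_iter : Bool) (depth : Int) (assume_root : Bool) : List String × List PvSDict :=
  match pending with
  | [] => st
  | root :: rest =>
    -- root is always an element of children ++ roots, so list.remove never raises and the default is never used
    let tmp := (PySem.List.remove? (children ++ roots) root).getD (children ++ roots)
    let combs := (PySem.List.pyRange 1 ((tmp.length : Int) + 1)).foldl (fun acc i => acc ++ PySem.List.combinations tmp i.toNat) []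
    let depth' := if max_iter then (tmp.length : Int) else depth
    let st' := combs.foldl (fun (st : List String × List PvSDict) comb =>
        if 0 < (comb.length : Int) ∧ (comb.length : Int) ≤ depth' then
          let merged := pvMergeEntries (root :: comb)
          let new_mr := if merged.1.contains "position" then merged.1.erase "position" else merged.1
          let new_utterance := String.ofList (PySem.Chars.strip merged.2)
          if st.1.contains new_utterance then st
          else (st.1 ++ [new_utterance], st.2 ++ [new_mr])
        else st) st
    if assume_root then st' else pvRootsLoopA rest children roots st' max_iter depth assume_root

def permuteSentCombos (newPairs : List (String × List (String × String))) (mrs : List (List (String × String))) (utterances : List String) (max_iter : Bool) (depth : Int) (assume_root : Bool) : Option (List String × (List (List (String × String)))) :=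
  let d := PySem.Dict.ofList (newPairs.map (fun p => (p.1, PySem.Dict.ofList p.2)))
  if d.size ≤ 1 then none
  else
    let rc := d.items.foldl (fun (acc : List (String × PvSDict) × List (String × PvSDict)) p =>
        if p.2.contains "name" && PySem.Str.isIn (p.2.getD "name" "") p.1 then (acc.1 ++ [p], acc.2) else (acc.1, acc.2 ++ [p])) ([], [])
    let st := pvRootsLoopA rc.1 rc.2 rc.1 (utterances, mrs.map PySem.Dict.ofList) max_iter depth assume_root
    some (st.1, st.2.map PySem.Dict.items)

-- ===== PORT B =====

-- is_root predicate of Source B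
def pvIsRoot (p : String × PvSDict) : Bool := p.2.contains "name" && PySem.Str.isIn (p.2.getD "name" "") p.1

-- one first-wins pass: combined.setdefault(k, v) over all items of all parts
def pvCombine (parts : List (String × PvSDict)) : PvSDict :=
  parts.foldl (fun dd p => p.2.items.foldl (fun dd kv => dd.setdefault kv.1 kv.2) dd) PySem.Dict.empty

-- OrderedDict((s, combined[s]) for s in _SLOT_ORDER if s in combined)
def pvReorder (combined : PvSDict) : PvSDict :=
  pvSlotOrder.foldl (fun acc s => if combined.contains s then acc.insert s (combined.getD s "") else acc) PySem.Dict.empty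

-- 'for j in range(len(rest)): nxt.append((combo + [rest[j]], rest[j+1:]))' — the index loop
-- produces exactly the successive (combo+[head of suffix], tail of suffix) pairs, in order
def pvGrow (combo rest : List (String × PvSDict)) : List (List (String × PvSDict) × List (String × PvSDict)) :=
  match rest with
  | [] => []
  | x :: t => (combo ++ [x], t) :: pvGrow combo t

-- 'for _ in range(limit):' — one recursive step per level; state = (utterances, mrs, seen)
def pvLevelLoopB (root : String × PvSDict) : Nat → List (List (String × PvSDict) × List (String × PvSDict)) → List String × List PvSDict × PySem.Set String → List String × List PvSDict × PySem.Set String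
  | 0, _, st => st
  | k+1, frontier, st =>
    let nxt := frontier.flatMap (fun p => pvGrow p.1 p.2)
    let st' := nxt.foldl (fun (st : List String × List PvSDict × PySem.Set String) p =>
        let parts := root :: p.1
        let new_mr := pvReorder (pvCombine parts)
        let new_utt := PySem.Str.strip (PySem.Str.join " " (parts.map (fun q => q.1)))
        if st.2.2.contains new_utt then st
        else (st.1 ++ [new_utt], st.2.1 ++ [new_mr], st.2.2.add new_utt)) st
    pvLevelLoopB root k nxt st'

def permuteSentCombos_alt (newPairs : List (String × List (String × String))) (mrs : List (List (String × String))) (utterances : List String) (max_iter : Bool) (depth : Int) (assume_root : Bool) : Option (List String × (List (List (String × String)))) :=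
  let items := (PySem.Dict.ofList (newPairs.map (fun p => (p.1, PySem.Dict.ofList p.2)))).items
  if items.length ≤ 1 then none
  else
    let roots := items.filter pvIsRoot
    let children := items.filter (fun p => !pvIsRoot p)
    let st := ((if assume_root then roots.take 1 else roots).foldl (fun st root =>
        let pool := (PySem.List.remove? (children ++ roots) root).getD (children ++ roots)
        let limit := if max_iter then (pool.length : Int) else min depth (pool.length : Int)
        pvLevelLoopB root limit.toNat [([], pool)] st)
      (utterances, mrs.map PySem.Dict.ofList, PySem.Set.ofList utterances))
    some (st.1, st.2.1.map PySem.Dict.items)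

-- ===== PRECONDITION & SPEC =====
def Spec_permuteSentCombos (newPairs : List (String × List (String × String))) (mrs : List (List (String × String))) (utterances : List String) (max_iter : Bool) (depth : Int) (assume_root : Bool) (out : Option (List String × (List (List (String × String))))) : Prop := out = permuteSentCombos_alt newPairs mrs utterances max_iter depth assume_root
instance (newPairs : List (String × List (String × String))) (mrs : List (List (String × String))) (utterances : List String) (max_iter : Bool) (depth : Int) (assume_root : Bool) (out : Option (List String × (List (List (String × String))))) : Decidable (Spec_permuteSentCombos newPairs mrs utterances max_iter depth assume_root out) := by unfold Spec_permuteSentCombos; infer_instance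

-- ===== CLAIM (what is proved, stated in full; the proofs are below) =====
def Claim_equal_permuteSentCombos : Prop := ∀ (newPairs : List (String × List (String × String))) (mrs : List (List (String × String))) (utterances : List String) (max_iter : Bool) (depth : Int) (assume_root : Bool), Dom_permuteSentCombos newPairs mrs utterances max_iter depth assume_root → Spec_permuteSentCombos newPairs mrs utterances max_iter depth assume_root (permuteSentCombos newPairs mrs utterances max_iter depth assume_root)

-- ===== LEMMAS AND PROOFS =====

-- first mr (in order) that contains the slot, and its value
def pvFirstGet : List PvSDict → String → Option String
  | [], _ => none
  | mr :: t, s => (mr.get? s).or (pvFirstGet t s)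

-- the per-comb step functions, lifted out of the two loops
def pvStepA (root : String × PvSDict) (st : List String × List PvSDict) (comb : List (String × PvSDict)) : List String × List PvSDict :=
  let merged := pvMergeEntries (root :: comb)
  let new_mr := if merged.1.contains "position" then merged.1.erase "position" else merged.1
  let new_utterance := String.ofList (PySem.Chars.strip merged.2)
  if st.1.contains new_utterance then st
  else (st.1 ++ [new_utterance], st.2 ++ [new_mr])

def pvStepB (root : String × PvSDict) (st : List String × List PvSDict × PySem.Set String) (comb : List (String × PvSDict)) : List String × List PvSDict × PySem.Set String :=
  let parts := root :: comb
  let new_mr := pvReorder (pvCombine parts)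
  let new_utt := PySem.Str.strip (PySem.Str.join " " (parts.map (fun p => p.1)))
  if st.2.2.contains new_utt then st
  else (st.1 ++ [new_utt], st.2.1 ++ [new_mr], st.2.2.add new_utt)

-- the combinations of sizes 1..lim, in the order both loops visit them
def pvM (tmp : List (String × PvSDict)) (lim : Int) : List (List (String × PvSDict)) :=
  (PySem.List.pyRange 1 (lim + 1)).flatMap (fun i => PySem.List.combinations tmp i.toNat)

-- one BFS extension step and its iterate
def pvExt (l : List (List (String × PvSDict) × List (String × PvSDict))) : List (List (String × PvSDict) × List (String × PvSDict)) :=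
  l.flatMap (fun p => pvGrow p.1 p.2)

def pvExtIter : Nat → List (List (String × PvSDict) × List (String × PvSDict)) → List (List (String × PvSDict) × List (String × PvSDict))
  | 0, l => l
  | m+1, l => pvExtIter m (pvExt l)

-- the list of combinations B processes in k levels starting from a frontier
def pvLevels : Nat → List (List (String × PvSDict) × List (String × PvSDict)) → List (List (String × PvSDict))
  | 0, _ => []
  | k+1, frontier => (pvExt frontier).map Prod.fst ++ pvLevels k (pvExt frontier)

-- the per-root step of B's roots fold, as a named function
def pvBroot (children roots : List (String × PvSDict)) (max_iter : Bool) (depth : Int) (st : List String × List PvSDict × PySem.Set String) (root : String × PvSDict) : List String × List PvSDict × PySem.Set String :=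
  let pool := (PySem.List.remove? (children ++ roots) root).getD (children ++ roots)
  let limit := if max_iter then (pool.length : Int) else min depth (pool.length : Int)
  pvLevelLoopB root limit.toNat [([], pool)] st

theorem pvMergeSlot_eq (slot : String) (ds : List PvSDict) (acc : PvSDict) :
    pvMergeSlot slot ds acc = match pvFirstGet ds slot with
      | some v => acc.insert slot v
      | none => acc := by
  induction ds with
  | nil => rfl
  | cons mr t ih =>
    simp only [pvMergeSlot, pvFirstGet, PySem.Dict.contains_eq_isSome_get?, PySem.Dict.getD_eq_get?_getD]
    cases h : mr.get? slot with
    | none => simpa using ih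
    | some v => simp


theorem pvSetdefault_fold_get? (l : List (String × String)) (d : PvSDict) (s : String) :
    (l.foldl (fun dd kv => dd.setdefault kv.1 kv.2) d).get? s
      = (d.get? s).or ((PySem.Dict.mk l).get? s) := by
  induction l generalizing d with
  | nil => simp [PySem.Dict.get?]
  | cons kv t ih =>
    obtain ⟨k, v⟩ := kv
    simp only [List.foldl_cons, ih, PySem.Dict.get?_mk_cons]
    by_cases hs : s = k
    · subst hs
      rw [PySem.Dict.get?_setdefault_self]
      simp only [BEq.rfl, if_true]
      cases h : d.get? s <;> simp
    · rw [PySem.Dict.get?_setdefault_of_ne _ _ hs]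
      have hk : (k == s) = false := by rw [beq_eq_false_iff_ne]; exact fun h => hs h.symm
      simp [hk]


theorem pvCombine_get? (parts : List (String × PvSDict)) (d : PvSDict) (s : String) :
    (parts.foldl (fun dd p => p.2.items.foldl (fun dd kv => dd.setdefault kv.1 kv.2) dd) d).get? s
      = (d.get? s).or (pvFirstGet (parts.map (·.2)) s) := by
  induction parts generalizing d with
  | nil => simp [pvFirstGet]
  | cons p t ih =>
    simp only [List.foldl_cons, ih, List.map_cons, pvFirstGet]
    rw [pvSetdefault_fold_get?]
    cases h : d.get? s <;> simp


theorem pvCombine_get?' (parts : List (String × PvSDict)) (s : String) :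
    (pvCombine parts).get? s = pvFirstGet (parts.map (·.2)) s := by
  unfold pvCombine
  rw [pvCombine_get?]
  simp [PySem.Dict.get?_empty]


theorem pvDict_eq (parts : List (String × PvSDict)) :
    pvMergeOrderedDicts (parts.map (·.2)) = pvReorder (pvCombine parts) := by
  unfold pvMergeOrderedDicts pvReorder
  apply PySem.List.foldl_congr_mem
  intro acc slot _
  rw [pvMergeSlot_eq, PySem.Dict.contains_eq_isSome_get?, PySem.Dict.getD_eq_get?_getD, pvCombine_get?']
  cases h : pvFirstGet (parts.map (·.2)) slot <;> simp


theorem pvMerge_contains_false (ds : List PvSDict) (x : String) (hx : x ∉ pvSlotOrder) :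
    (pvMergeOrderedDicts ds).contains x = false := by
  unfold pvMergeOrderedDicts
  have main : ∀ (slots : List String) (d : PvSDict), x ∉ slots → d.contains x = false →
      (slots.foldl (fun merged slot => pvMergeSlot slot ds merged) d).contains x = false := by
    intro slots
    induction slots with
    | nil => intro d _ hd; simpa using hd
    | cons slot t ih =>
      intro d hmem hd
      simp only [List.foldl_cons]
      refine ih _ (fun h => hmem (List.mem_cons_of_mem _ h)) ?_
      rw [pvMergeSlot_eq]
      have hne : (x == slot) = false := by
        rw [beq_eq_false_iff_ne]; exact fun h => hmem (h ▸ List.mem_cons_self)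
      cases h : pvFirstGet ds slot with
      | none => simpa using hd
      | some v => simp [PySem.Dict.contains_insert, hne, hd]
  exact main pvSlotOrder PySem.Dict.empty hx (by simp)


theorem pvStrip_cons_space (l : List Char) : PySem.Chars.strip (' ' :: l) = PySem.Chars.strip l := by
  simp [PySem.Chars.strip, PySem.Chars.lstrip, show PySem.Chars.isspace ' ' = true from rfl]


theorem pvFlatJoin (h : List Char) (t : List (List Char)) :
    (h :: t).flatMap (fun x => ' ' :: x) = ' ' :: PySem.Chars.join [' '] (h :: t) := by
  induction t generalizing h with
  | nil => simp [PySem.Chars.join_singleton]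
  | cons q r ih =>
    simp only [List.flatMap_cons] at *
    rw [ih q, PySem.Chars.join_cons_cons]
    simp


theorem pvUtt_eq (parts : List (String × PvSDict)) (h : parts ≠ []) :
    String.ofList (PySem.Chars.strip (parts.foldl (fun (acc : List Char × List PvSDict) p => (acc.1 ++ (' ' :: p.1.toList), acc.2 ++ [p.2])) (([] : List Char), ([] : List PvSDict))).1)
      = PySem.Str.strip (PySem.Str.join " " (parts.map (fun p => p.1))) := by
  apply String.toList_inj.mp
  rw [show (fun (acc : List Char × List PvSDict) (p : String × PvSDict) => (acc.1 ++ (' ' :: p.1.toList), acc.2 ++ [p.2]))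
        = (fun acc p => ((fun a (q : String × PvSDict) => a ++ (' ' :: q.1.toList)) acc.1 p, (fun a (q : String × PvSDict) => a ++ [q.2]) acc.2 p)) from rfl,
     PySem.List.foldl_prod_mk (f := fun a (q : String × PvSDict) => a ++ (' ' :: q.1.toList)) (g := fun a (q : String × PvSDict) => a ++ [q.2])]
  simp only [PySem.List.foldl_append_eq_flatMap, List.nil_append]
  obtain ⟨p0, rest, rfl⟩ : ∃ p0 rest, parts = p0 :: rest := by
    cases parts with | nil => exact absurd rfl h | cons a b => exact ⟨a, b, rfl⟩
  have hf : (p0 :: rest).flatMap (fun p => ' ' :: p.1.toList) = ((p0 :: rest).map (fun p => p.1.toList)).flatMap (fun x => ' ' :: x) := by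
    simp [List.flatMap_map]
  rw [hf]
  simp only [List.map_cons] at *
  rw [pvFlatJoin, pvStrip_cons_space]
  simp [PySem.Str.toList_strip, PySem.Str.toList_join, List.map_map, Function.comp_def]


theorem pvFlatMap_range_min {γ : Type} (N : Nat) (d : Int) (f : Int → List γ) :
    (PySem.List.pyRange 1 ((N : Int) + 1)).flatMap (fun i => if i ≤ d then f i else [])
      = (PySem.List.pyRange 1 (min d (N : Int) + 1)).flatMap f := by
  induction N with
  | zero =>
    have h1 : PySem.List.pyRange 1 ((0 : Int) + 1) = [] := by
      apply List.eq_nil_iff_forall_not_mem.mpr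
      intro x hx
      have := PySem.List.mem_pyRange_one.mp hx
      omega
    have h2 : PySem.List.pyRange 1 (min d (0 : Int) + 1) = [] := by
      apply List.eq_nil_iff_forall_not_mem.mpr
      intro x hx
      have := PySem.List.mem_pyRange_one.mp hx
      omega
    simp [h2]
  | succ n ih =>
    have hc : ((n + 1 : Nat) : Int) = (n : Int) + 1 := by push_cast; ring
    rw [hc]
    rw [PySem.List.pyRange_one_succ_right (by omega : (1 : Int) ≤ (n : Int) + 1)]
    rw [List.flatMap_append, ih]
    by_cases hd : (n : Int) + 1 ≤ d
    · have hm1 : min d ((n : Int) + 1) = (n : Int) + 1 := by omega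
      have hm2 : min d (n : Int) = (n : Int) := by omega
      rw [hm1, hm2, PySem.List.pyRange_one_succ_right (by omega : (1 : Int) ≤ (n : Int) + 1)]
      simp [List.flatMap_append, hd]
    · have hm : min d ((n : Int) + 1) = min d (n : Int) := by omega
      rw [hm]
      simp [hd]


theorem pvMergeEntries_fst (parts : List (String × PvSDict)) :
    (pvMergeEntries parts).1 = pvMergeOrderedDicts (parts.map (·.2)) := by
  unfold pvMergeEntries
  rw [show (fun (acc : List Char × List PvSDict) (p : String × PvSDict) => (acc.1 ++ (' ' :: p.1.toList), acc.2 ++ [p.2]))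
        = (fun acc p => ((fun a (q : String × PvSDict) => a ++ (' ' :: q.1.toList)) acc.1 p, (fun a (q : String × PvSDict) => a ++ [q.2]) acc.2 p)) from rfl,
     PySem.List.foldl_prod_mk (f := fun a (q : String × PvSDict) => a ++ (' ' :: q.1.toList)) (g := fun a (q : String × PvSDict) => a ++ [q.2])]
  simp only [PySem.List.foldl_append_singleton_eq_map, List.nil_append]


theorem pvStepA_eq (root : String × PvSDict) (u : List String) (m : List PvSDict) (comb : List (String × PvSDict)) :
    pvStepA root (u, m) comb
      = (if u.contains (PySem.Str.strip (PySem.Str.join " " ((root :: comb).map (fun p => p.1)))) then (u, m)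
         else (u ++ [PySem.Str.strip (PySem.Str.join " " ((root :: comb).map (fun p => p.1)))],
               m ++ [pvReorder (pvCombine (root :: comb))])) := by
  unfold pvStepA
  dsimp only
  have hmr : (pvMergeEntries (root :: comb)).1 = pvReorder (pvCombine (root :: comb)) := by
    rw [pvMergeEntries_fst, pvDict_eq]
  have hpos : (pvMergeEntries (root :: comb)).1.contains "position" = false := by
    rw [pvMergeEntries_fst]
    exact pvMerge_contains_false _ _ (by decide)
  have hut : String.ofList (PySem.Chars.strip (pvMergeEntries (root :: comb)).2)
      = PySem.Str.strip (PySem.Str.join " " ((root :: comb).map (fun p => p.1))) := by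
    exact pvUtt_eq (root :: comb) (by simp)
  rw [hut]
  simp only [hpos, Bool.false_eq_true, if_false]
  rw [hmr]


theorem pvFold_inner (root : String × PvSDict) (M : List (List (String × PvSDict))) :
    ∀ (u : List String) (m : List PvSDict) (s : PySem.Set String),
    (∀ x, s.contains x = u.contains x) →
    (M.foldl (pvStepB root) (u, m, s)).1 = (M.foldl (pvStepA root) (u, m)).1
      ∧ (M.foldl (pvStepB root) (u, m, s)).2.1 = (M.foldl (pvStepA root) (u, m)).2
      ∧ ∀ x, (M.foldl (pvStepB root) (u, m, s)).2.2.contains x = (M.foldl (pvStepA root) (u, m)).1.contains x := by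
  induction M with
  | nil => intro u m s hinv; exact ⟨rfl, rfl, hinv⟩
  | cons c t ih =>
    intro u m s hinv
    simp only [List.foldl_cons]
    have hA := pvStepA_eq root u m c
    have hB : pvStepB root (u, m, s) c
        = (if s.contains (PySem.Str.strip (PySem.Str.join " " ((root :: c).map (fun p => p.1)))) then (u, m, s)
           else (u ++ [PySem.Str.strip (PySem.Str.join " " ((root :: c).map (fun p => p.1)))],
                 m ++ [pvReorder (pvCombine (root :: c))],
                 s.add (PySem.Str.strip (PySem.Str.join " " ((root :: c).map (fun p => p.1)))))) := rfl
    simp only [List.map_cons] at hA hB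
    by_cases hc : u.contains (PySem.Str.strip (PySem.Str.join " " (root.1 :: c.map (fun p => p.1)))) = true
    · have hsc : s.contains (PySem.Str.strip (PySem.Str.join " " (root.1 :: c.map (fun p => p.1)))) = true := by
        rw [hinv]; exact hc
      rw [hA, hB, if_pos hsc, if_pos hc]
      exact ih u m s hinv
    · have hc' : u.contains (PySem.Str.strip (PySem.Str.join " " (root.1 :: c.map (fun p => p.1)))) = false := by
        simpa using hc
      have hsc : s.contains (PySem.Str.strip (PySem.Str.join " " (root.1 :: c.map (fun p => p.1)))) = false := by
        rw [hinv]; exact hc'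
      rw [hA, hB, if_neg (by rw [hsc]; simp), if_neg (by rw [hc']; simp)]
      refine ih _ _ _ ?_
      intro x
      have hns : PySem.Str.strip (PySem.Str.join " " (root.1 :: c.map (fun p => p.1))) ∉ s := by
        intro hmem
        have hco : s.contains (PySem.Str.strip (PySem.Str.join " " (root.1 :: c.map (fun p => p.1)))) = true := by
          simp [hmem]
        rw [hco] at hsc
        cases hsc
      have hadd : (s.add (PySem.Str.strip (PySem.Str.join " " (root.1 :: c.map (fun p => p.1)))))
          = s ++ [PySem.Str.strip (PySem.Str.join " " (root.1 :: c.map (fun p => p.1)))] := by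
        simp [PySem.Set.add, hns]
      rw [hadd]
      have hx := hinv x
      simp only [PySem.Set.contains] at hx
      simp only [PySem.Set.contains, List.contains_append, hx]


theorem pvInnerA_eq (root : String × PvSDict) (tmp : List (String × PvSDict)) (d' : Int) (st : List String × List PvSDict) :
    ((PySem.List.pyRange 1 ((tmp.length : Int) + 1)).foldl (fun acc i => acc ++ PySem.List.combinations tmp i.toNat) []).foldl
        (fun st comb => if 0 < (comb.length : Int) ∧ (comb.length : Int) ≤ d' then pvStepA root st comb else st) st
      = (pvM tmp (min d' (tmp.length : Int))).foldl (pvStepA root) st := by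
  rw [PySem.List.foldl_append_eq_flatMap, List.nil_append]
  rw [PySem.List.foldl_ite_eq_foldl_filter (p := fun comb : List (String × PvSDict) => 0 < (comb.length : Int) ∧ (comb.length : Int) ≤ d')]
  rw [List.filter_flatMap]
  have hcong : ∀ i ∈ PySem.List.pyRange 1 ((tmp.length : Int) + 1),
      (PySem.List.combinations tmp i.toNat).filter (fun comb => decide (0 < (comb.length : Int) ∧ (comb.length : Int) ≤ d'))
        = (fun i => if i ≤ d' then PySem.List.combinations tmp i.toNat else []) i := by
    intro i hi
    obtain ⟨h1, h2⟩ := PySem.List.mem_pyRange_one.mp hi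
    beta_reduce
    have hit : ((i.toNat : Nat) : Int) = i := Int.toNat_of_nonneg (by omega)
    by_cases hid : i ≤ d'
    · rw [if_pos hid]
      refine List.filter_eq_self.mpr ?_
      intro c hc
      have hl := PySem.List.length_of_mem_combinations hc
      rw [decide_eq_true_eq, hl, hit]
      exact ⟨by omega, hid⟩
    · rw [if_neg hid]
      refine List.filter_eq_nil_iff.mpr ?_
      intro c hc
      have hl := PySem.List.length_of_mem_combinations hc
      rw [hl, hit]
      simp only [decide_eq_true_eq, not_and]
      intro _
      omega
  rw [List.flatMap_congr hcong, pvFlatMap_range_min tmp.length d' (fun i => PySem.List.combinations tmp i.toNat)]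
  rfl


-- ===== BFS-frontier characterisation (B side) =====

theorem pvExt_nil : pvExt [] = [] := rfl

theorem pvExtIter_nil (m : Nat) : pvExtIter m [] = [] := by
  induction m with
  | zero => rfl
  | succ k ih => simpa [pvExtIter, pvExt_nil] using ih

theorem pvExt_append (l1 l2 : List (List (String × PvSDict) × List (String × PvSDict))) :
    pvExt (l1 ++ l2) = pvExt l1 ++ pvExt l2 := by
  simp [pvExt]

theorem pvExtIter_append (m : Nat) (l1 l2 : List (List (String × PvSDict) × List (String × PvSDict))) :
    pvExtIter m (l1 ++ l2) = pvExtIter m l1 ++ pvExtIter m l2 := by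
  induction m generalizing l1 l2 with
  | zero => rfl
  | succ k ih => simp [pvExtIter, pvExt_append, ih]

theorem pvExtIter_fst (m : Nat) :
    ∀ (c rest : List (String × PvSDict)),
      (pvExtIter m [(c, rest)]).map Prod.fst = (PySem.List.combinations rest m).map (c ++ ·) := by
  induction m with
  | zero =>
    intro c rest
    simp [pvExtIter, PySem.List.combinations_zero]
  | succ m ih =>
    intro c rest
    have hstep : pvExtIter (m+1) [(c, rest)] = pvExtIter m (pvGrow c rest) := by
      simp [pvExtIter, pvExt]
    rw [hstep]
    induction rest generalizing c with
    | nil => simp [pvGrow, pvExtIter_nil, PySem.List.combinations_nil_succ]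
    | cons x t iht =>
      have hgrow : pvGrow c (x :: t) = [(c ++ [x], t)] ++ pvGrow c t := rfl
      rw [hgrow, pvExtIter_append, List.map_append, ih (c ++ [x]) t,
          iht c (by simp [pvExtIter, pvExt]),
          PySem.List.combinations_cons_succ, List.map_append, List.map_map]
      congr 1
      apply List.map_congr_left
      intro y _
      simp

theorem pvLevelLoopB_eq_foldl (root : String × PvSDict) (k : Nat) :
    ∀ (frontier : List (List (String × PvSDict) × List (String × PvSDict))) (st : List String × List PvSDict × PySem.Set String),
      pvLevelLoopB root k frontier st = (pvLevels k frontier).foldl (pvStepB root) st := by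
  induction k with
  | zero => intro frontier st; rfl
  | succ k ih =>
    intro frontier st
    show pvLevelLoopB root (k+1) frontier st = _
    rw [pvLevelLoopB]
    simp only [pvLevels, List.foldl_append]
    rw [ih]
    congr 1
    rw [List.foldl_map]
    rfl

theorem pvLevels_eq (k : Nat) :
    ∀ (frontier : List (List (String × PvSDict) × List (String × PvSDict))),
      pvLevels k frontier = (List.range k).flatMap (fun j => (pvExtIter (j+1) frontier).map Prod.fst) := by
  induction k with
  | zero => intro frontier; rfl
  | succ k ih =>
    intro frontier
    rw [List.range_succ_eq_map]
    simp only [List.flatMap_cons, List.flatMap_map]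
    show (pvExt frontier).map Prod.fst ++ pvLevels k (pvExt frontier) = _
    rw [ih (pvExt frontier)]
    rfl

theorem pvLevels_combinations (k : Nat) (pool : List (String × PvSDict)) :
    pvLevels k [(([] : List (String × PvSDict)), pool)]
      = (List.range k).flatMap (fun j => PySem.List.combinations pool (j+1)) := by
  rw [pvLevels_eq]
  apply List.flatMap_congr
  intro j _
  rw [pvExtIter_fst]
  simp

theorem pvM_toNat (lim : Int) (pool : List (String × PvSDict)) :
    pvM pool lim = (List.range lim.toNat).flatMap (fun j => PySem.List.combinations pool (j+1)) := by
  by_cases h : 0 ≤ lim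
  · obtain ⟨n, rfl⟩ : ∃ n : Nat, lim = (n : Int) := ⟨lim.toNat, (Int.toNat_of_nonneg h).symm⟩
    rw [Int.toNat_natCast]
    induction n with
    | zero =>
      have h0 : PySem.List.pyRange 1 ((0 : Int) + 1) = [] := by
        apply List.eq_nil_iff_forall_not_mem.mpr
        intro x hx
        have := PySem.List.mem_pyRange_one.mp hx
        omega
      simp [pvM]
    | succ n ihn =>
      have hc : ((n + 1 : Nat) : Int) = (n : Int) + 1 := by push_cast; ring
      rw [hc]
      unfold pvM
      rw [PySem.List.pyRange_one_succ_right (by omega : (1 : Int) ≤ (n : Int) + 1), List.flatMap_append]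
      have ih' := ihn (by positivity)
      unfold pvM at ih'
      rw [ih', List.range_succ, List.flatMap_append]
      have ht : (((n : Int) + 1)).toNat = n + 1 := by omega
      simp [ht]
  · have hneg : lim < 0 := by omega
    have h1 : PySem.List.pyRange 1 (lim + 1) = [] := by
      apply List.eq_nil_iff_forall_not_mem.mpr
      intro x hx
      have := PySem.List.mem_pyRange_one.mp hx
      omega
    have h2 : lim.toNat = 0 := by omega
    simp [pvM, h1, h2]

theorem pvBroot_eq (children roots : List (String × PvSDict)) (max_iter : Bool) (depth : Int) (root : String × PvSDict) (st : List String × List PvSDict × PySem.Set String) :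
    pvBroot children roots max_iter depth st root
      = (pvM ((PySem.List.remove? (children ++ roots) root).getD (children ++ roots))
            (min (if max_iter then (((PySem.List.remove? (children ++ roots) root).getD (children ++ roots)).length : Int) else depth)
                 (((PySem.List.remove? (children ++ roots) root).getD (children ++ roots)).length : Int))).foldl (pvStepB root) st := by
  unfold pvBroot
  set pool := (PySem.List.remove? (children ++ roots) root).getD (children ++ roots) with hpool
  have hlim : (if max_iter then (pool.length : Int) else min depth (pool.length : Int))
      = min (if max_iter then (pool.length : Int) else depth) (pool.length : Int) := by
    cases max_iter <;> simp
  rw [pvLevelLoopB_eq_foldl, pvLevels_combinations, ← pvM_toNat, hlim]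

-- A's accumulating partition loop computes the two filters of B
theorem pvPartition_eq (l : List (String × PvSDict)) :
    l.foldl (fun (acc : List (String × PvSDict) × List (String × PvSDict)) p =>
        if p.2.contains "name" && PySem.Str.isIn (p.2.getD "name" "") p.1 then (acc.1 ++ [p], acc.2) else (acc.1, acc.2 ++ [p])) ([], [])
      = (l.filter pvIsRoot, l.filter (fun p => !pvIsRoot p)) := by
  have hfun : (fun (acc : List (String × PvSDict) × List (String × PvSDict)) p =>
        if p.2.contains "name" && PySem.Str.isIn (p.2.getD "name" "") p.1 then (acc.1 ++ [p], acc.2) else (acc.1, acc.2 ++ [p]))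
      = (fun acc p => ((fun a (q : String × PvSDict) => if pvIsRoot q then a ++ [q] else a) acc.1 p,
                       (fun a (q : String × PvSDict) => if !pvIsRoot q then a ++ [q] else a) acc.2 p)) := by
    funext acc p
    simp only [pvIsRoot]
    by_cases h : (p.2.contains "name" && PySem.Str.isIn (p.2.getD "name" "") p.1) = true
    · simp only [h]
      simp
    · rw [Bool.not_eq_true] at h
      simp only [h]
      simp
  rw [hfun, PySem.List.foldl_prod_mk (f := fun a (q : String × PvSDict) => if pvIsRoot q then a ++ [q] else a)
        (g := fun a (q : String × PvSDict) => if !pvIsRoot q then a ++ [q] else a),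
      PySem.List.foldl_append_if_eq_filter, PySem.List.foldl_append_if_eq_filter]
  simp

theorem pvRootsLoop_eq (children roots : List (String × PvSDict)) (max_iter : Bool) (depth : Int) (assume_root : Bool) :
    ∀ (pending : List (String × PvSDict)) (u : List String) (m : List PvSDict) (s : PySem.Set String),
    (∀ x, s.contains x = u.contains x) →
    ((if assume_root then pending.take 1 else pending).foldl (pvBroot children roots max_iter depth) (u, m, s)).1
        = (pvRootsLoopA pending children roots (u, m) max_iter depth assume_root).1
      ∧ ((if assume_root then pending.take 1 else pending).foldl (pvBroot children roots max_iter depth) (u, m, s)).2.1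
        = (pvRootsLoopA pending children roots (u, m) max_iter depth assume_root).2
      ∧ ∀ x, ((if assume_root then pending.take 1 else pending).foldl (pvBroot children roots max_iter depth) (u, m, s)).2.2.contains x
        = (pvRootsLoopA pending children roots (u, m) max_iter depth assume_root).1.contains x := by
  intro pending
  induction pending with
  | nil =>
    intro u m s hinv
    cases assume_root <;> exact ⟨rfl, rfl, hinv⟩
  | cons root rest ih =>
    intro u m s hinv
    simp only [pvRootsLoopA]
    set tmp := (PySem.List.remove? (children ++ roots) root).getD (children ++ roots) with htmp
    have hA : ((PySem.List.pyRange 1 ((tmp.length : Int) + 1)).foldl (fun acc i => acc ++ PySem.List.combinations tmp i.toNat) []).foldl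
        (fun (st : List String × List PvSDict) comb =>
          if 0 < (comb.length : Int) ∧ (comb.length : Int) ≤ (if max_iter then (tmp.length : Int) else depth) then
            let merged := pvMergeEntries (root :: comb)
            let new_mr := if merged.1.contains "position" then merged.1.erase "position" else merged.1
            let new_utterance := String.ofList (PySem.Chars.strip merged.2)
            if st.1.contains new_utterance then st
            else (st.1 ++ [new_utterance], st.2 ++ [new_mr])
          else st) (u, m)
        = (pvM tmp (min (if max_iter then (tmp.length : Int) else depth) (tmp.length : Int))).foldl (pvStepA root) (u, m) :=
      pvInnerA_eq root tmp _ (u, m)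
    have hB : pvBroot children roots max_iter depth (u, m, s) root
        = (pvM tmp (min (if max_iter then (tmp.length : Int) else depth) (tmp.length : Int))).foldl (pvStepB root) (u, m, s) :=
      pvBroot_eq children roots max_iter depth root (u, m, s)
    have hfold := pvFold_inner root (pvM tmp (min (if max_iter then (tmp.length : Int) else depth) (tmp.length : Int))) u m s hinv
    cases assume_root with
    | true =>
      simp only [List.take_succ_cons, List.take_zero, List.foldl_cons, List.foldl_nil, if_true]
      rw [hB, hA]
      simpa using hfold
    | false =>
      simp only [Bool.false_eq_true, if_false, List.foldl_cons]
      rw [hB, hA]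
      obtain ⟨h1, h2, h3⟩ := hfold
      have hXB : (List.foldl (pvStepB root) (u, m, s) (pvM tmp (min (if max_iter = true then (tmp.length : Int) else depth) (tmp.length : Int))))
          = ((List.foldl (pvStepA root) (u, m) (pvM tmp (min (if max_iter = true then (tmp.length : Int) else depth) (tmp.length : Int)))).1,
             (List.foldl (pvStepA root) (u, m) (pvM tmp (min (if max_iter = true then (tmp.length : Int) else depth) (tmp.length : Int)))).2,
             (List.foldl (pvStepB root) (u, m, s) (pvM tmp (min (if max_iter = true then (tmp.length : Int) else depth) (tmp.length : Int)))).2.2) := by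
        rw [← h1, ← h2]
      rw [hXB]
      have := ih (List.foldl (pvStepA root) (u, m) (pvM tmp (min (if max_iter = true then (tmp.length : Int) else depth) (tmp.length : Int)))).1
        (List.foldl (pvStepA root) (u, m) (pvM tmp (min (if max_iter = true then (tmp.length : Int) else depth) (tmp.length : Int)))).2
        (List.foldl (pvStepB root) (u, m, s) (pvM tmp (min (if max_iter = true then (tmp.length : Int) else depth) (tmp.length : Int)))).2.2
        (by intro x; rw [h3])
      simpa using this

theorem pvPorts_eq (newPairs : List (String × List (String × String))) (mrs : List (List (String × String))) (utterances : List String) (max_iter : Bool) (depth : Int) (assume_root : Bool) :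
    permuteSentCombos newPairs mrs utterances max_iter depth assume_root
      = permuteSentCombos_alt newPairs mrs utterances max_iter depth assume_root := by
  unfold permuteSentCombos permuteSentCombos_alt
  by_cases hs : (PySem.Dict.ofList (newPairs.map (fun p => (p.1, PySem.Dict.ofList p.2)))).size ≤ 1
  · have hs' : (PySem.Dict.ofList (newPairs.map (fun p => (p.1, PySem.Dict.ofList p.2)))).items.length ≤ 1 := hs
    simp only [hs, hs', if_pos]
  · have hs' : ¬ (PySem.Dict.ofList (newPairs.map (fun p => (p.1, PySem.Dict.ofList p.2)))).items.length ≤ 1 := hs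
    simp only [hs, hs', if_false]
    set items := (PySem.Dict.ofList (newPairs.map (fun p => (p.1, PySem.Dict.ofList p.2)))).items with hitems
    rw [pvPartition_eq items]
    have hinv : ∀ x, (PySem.Set.ofList utterances).contains x = utterances.contains x := by
      intro x
      by_cases hx : x ∈ utterances
      · have h1 : x ∈ PySem.Set.ofList utterances := (PySem.Set.mem_ofList utterances x).mpr hx
        simp [PySem.Set.contains, h1, hx]
      · have h1 : x ∉ PySem.Set.ofList utterances := fun h => hx ((PySem.Set.mem_ofList utterances x).mp h)
        simp [PySem.Set.contains, h1, hx]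
    obtain ⟨h1, h2, _⟩ := pvRootsLoop_eq (items.filter (fun p => !pvIsRoot p)) (items.filter pvIsRoot) max_iter depth assume_root
      (items.filter pvIsRoot) utterances (mrs.map PySem.Dict.ofList) (PySem.Set.ofList utterances) hinv
    rw [← h1, ← h2]
    rfl

-- ===== VERDICT (by name: the statement is the Claim_ definition above) =====
theorem permuteSentCombos_spec : Claim_equal_permuteSentCombos := by
  intro newPairs mrs utterances max_iter depth assume_root _
  unfold Spec_permuteSentCombos
  exact pvPorts_eq newPairs mrs utterances max_iter depth assume_root
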